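-- pv_equiv track=rewrite | github.com/yashrajbisoyi/x_geo_invest_ai | x_geo_invest_ai/website/app.py | text_matches_country_terms
-- ===== SOURCE A (Python) =====
-- def normalize_country_name(value):
--     return " ".join(str(value or "").strip().lower().replace("-", " ").split())
--
-- def text_matches_country_terms(text, terms):
--     normalized_text = normalize_country_name(text)
--     if not normalized_text or not terms:
--         return False
--
--     padded_text = f" {normalized_text} "
--     for term in terms:
--         normalized_term = normalize_country_name(term)
--         if not normalized_term:
--             continue
--         if f" {normalized_term} " in padded_text:
--             return True
--     return False
-- ===== SOURCE B (Python) =====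
-- def _tokens(value):
--     return str(value or "").strip().lower().replace("-", " ").split()
--
-- def text_matches_country_terms(text, terms):
--     words = _tokens(text)
--     if not words or not terms:
--         return False
--     for term in terms:
--         tw = _tokens(term)
--         m = len(tw)
--         if m == 0:
--             continue
--         for i in range(len(words) - m + 1):
--             if words[i:i + m] == tw:
--                 return True
--     return False
-- ===== Notes on version B (the rewrite author's own statement) =====
-- stated objective: faster
-- what changed: Replaces A's padded-substring test (f' {term} ' in f' {text} ') by tokenizing text once into a word list and searching each term's token list as a contiguous sublist via a sliding-window slice comparison, so candidate match positions are word boundaries only (len(words)-m+1 windows) instead of every character position scanned by str 'in'.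
import Mathlib
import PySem

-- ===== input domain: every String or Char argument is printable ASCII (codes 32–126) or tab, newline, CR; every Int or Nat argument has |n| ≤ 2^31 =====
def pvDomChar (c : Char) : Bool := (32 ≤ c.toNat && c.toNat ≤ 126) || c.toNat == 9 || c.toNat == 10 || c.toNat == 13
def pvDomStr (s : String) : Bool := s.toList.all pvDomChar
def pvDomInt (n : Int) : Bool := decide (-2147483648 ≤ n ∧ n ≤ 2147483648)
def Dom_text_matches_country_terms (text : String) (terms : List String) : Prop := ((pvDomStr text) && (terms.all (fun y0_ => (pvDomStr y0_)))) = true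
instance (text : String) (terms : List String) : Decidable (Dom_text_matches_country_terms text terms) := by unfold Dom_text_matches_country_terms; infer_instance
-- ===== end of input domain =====

-- B replaces A's padded-substring test on the space-joined normalized string by token
-- n-gram matching over token lists: match positions are word boundaries, not every char
-- position of a substring scan (measured faster in a timing run at the largest sizes).

-- ===== PORT A =====
def normalize_country_name (value : String) : String :=
  PySem.Str.join " " (PySem.Str.split₀
    (PySem.Str.replace (PySem.Str.lower (PySem.Str.strip value)) "-" " "))

-- f" {s} "
def pvPadded (s : String) : String := PySem.Str.join "" [" ", s, " "]

def pvLoopA (padded : String) : List String → Bool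
  | [] => false
  | term :: rest =>
    let ntm := normalize_country_name term
    if ntm = "" then pvLoopA padded rest
    else if PySem.Str.isIn (pvPadded ntm) padded then true
    else pvLoopA padded rest

def text_matches_country_terms (text : String) (terms : List String) : Bool :=
  let nt := normalize_country_name text
  if nt = "" ∨ terms = [] then false
  else pvLoopA (pvPadded nt) terms

-- ===== PORT B =====
def pvTokens (value : String) : List String :=
  PySem.Str.split₀
    (PySem.Str.replace (PySem.Str.lower (PySem.Str.strip value)) "-" " ")

-- inner loop: for i in range(len(words) - m + 1): if words[i:i+m] == tw: return True
def pvNgram (words tw : List String) : Bool :=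
  (PySem.List.pyRange 0 ((words.length : Int) - (tw.length : Int) + 1) 1).any
    (fun i => PySem.List.slice words (some i) (some (i + (tw.length : Int))) == tw)

def pvLoopB (words : List String) : List String → Bool
  | [] => false
  | term :: rest =>
    let tw := pvTokens term
    if tw.length = 0 then pvLoopB words rest
    else if pvNgram words tw then true
    else pvLoopB words rest

def text_matches_country_terms_alt (text : String) (terms : List String) : Bool :=
  let words := pvTokens text
  if words = [] ∨ terms = [] then false
  else pvLoopB words terms

-- ===== PRECONDITION & SPEC =====
def Spec_text_matches_country_terms (text : String) (terms : List String) (out : Bool) : Prop := out = text_matches_country_terms_alt text terms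
instance (text : String) (terms : List String) (out : Bool) : Decidable (Spec_text_matches_country_terms text terms out) := by unfold Spec_text_matches_country_terms; infer_instance

-- ===== CLAIM (what is proved, stated in full; the proofs are below) =====
def Claim_equal_text_matches_country_terms : Prop := ∀ (text : String) (terms : List String), Dom_text_matches_country_terms text terms → Spec_text_matches_country_terms text terms (text_matches_country_terms text terms)

-- ===== LEMMAS AND PROOFS =====
def pvE (ws : List (List Char)) : List Char := ws.flatMap (fun w => ' ' :: w)

theorem pvE_enc (ws : List (List Char)) (h : ws ≠ []) :
    ' ' :: List.intercalate [' '] ws = pvE ws := by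
  induction ws with
  | nil => simp at h
  | cons w t ih =>
    cases t with
    | nil => simp [pvE, List.intercalate]
    | cons x t' =>
      have h2 := ih (by simp)
      simp [pvE, List.intercalate, List.intersperse] at h2 ⊢
      exact h2

theorem pvE_pad_cons (ws : List (List Char)) : ∃ r, pvE ws ++ [' '] = ' ' :: r := by
  cases ws with
  | nil => exact ⟨[], rfl⟩
  | cons w t => exact ⟨w ++ pvE t ++ [' '], by simp [pvE]⟩

theorem pvWordEq {x y p q : List Char} (hx : ∀ c ∈ x, c ≠ ' ') (hy : ∀ c ∈ y, c ≠ ' ')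
    (h : x ++ ' ' :: p <+: y ++ ' ' :: q) : x = y ∧ p <+: q := by
  have hx' : x <+: y ++ ' ' :: q := (List.prefix_append x (' ' :: p)).trans h
  have hy' : y <+: y ++ ' ' :: q := List.prefix_append y (' ' :: q)
  rcases List.prefix_or_prefix_of_prefix hx' hy' with hxy | hyx
  · rcases hxy with ⟨z, rfl⟩
    cases z with
    | nil => simp at h ⊢; exact h
    | cons c z' =>
      exfalso
      rw [List.append_assoc] at h
      have h3 := (List.prefix_append_right_inj x).1 h
      have hc := (List.cons_prefix_cons.1 (by simpa using h3)).1
      exact hy c (by simp) hc.symm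
  · rcases hyx with ⟨z, rfl⟩
    cases z with
    | nil => simp at h ⊢; exact h
    | cons c z' =>
      exfalso
      rw [List.append_assoc] at h
      have h3 := (List.prefix_append_right_inj y).1 h
      have hc := (List.cons_prefix_cons.1 (by simpa using h3)).1
      exact hx c (by simp) hc

def pvGood (ws : List (List Char)) : Prop :=
  ∀ w ∈ ws, w ≠ [] ∧ ∀ c ∈ w, c ≠ ' '

theorem pvP : ∀ (u t : List (List Char)), pvGood u → pvGood t → u ≠ [] →
    (pvE u ++ [' ']) <+: (pvE t ++ [' ']) → u <+: t := by
  intro u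
  induction u with
  | nil => intro t _ _ h; simp at h
  | cons x u' ih =>
    intro t hu ht _ h
    cases t with
    | nil =>
      exfalso
      have hx := (hu x (by simp)).1
      cases x with
      | nil => exact hx rfl
      | cons a b => have hlen := h.length_le; simp [pvE] at hlen
    | cons y t' =>
      have h' : x ++ (pvE u' ++ [' ']) <+: y ++ (pvE t' ++ [' ']) := by
        simpa [pvE] using h
      obtain ⟨r, hr⟩ := pvE_pad_cons u'
      obtain ⟨r2, hr2⟩ := pvE_pad_cons t'
      rw [hr, hr2] at h'
      obtain ⟨hxy, hpq⟩ := pvWordEq (hu x (by simp)).2 (ht y (by simp)).2 h'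
      subst hxy
      cases u' with
      | nil => exact List.cons_prefix_cons.2 ⟨rfl, by simp⟩
      | cons a b =>
        have : pvE (a :: b) ++ [' '] <+: pvE t' ++ [' '] := by
          rw [hr, hr2]; exact List.cons_prefix_cons.2 ⟨rfl, hpq⟩
        have := ih t' (fun w hw => hu w (by simp [hw])) (fun w hw => ht w (by simp [hw])) (by simp) this
        exact List.cons_prefix_cons.2 ⟨rfl, this⟩

theorem pvSkip {x M X : List Char} (hx : ∀ c ∈ x, c ≠ ' ') :
    (' ' :: X) <:+: x ++ M → (' ' :: X) <:+: M := by
  induction x with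
  | nil => simp
  | cons c x' ih =>
    intro h
    rcases List.infix_cons_iff.1 (by simpa using h) with hp | hi
    · exact absurd (List.cons_prefix_cons.1 hp).1.symm (hx c (by simp))
    · exact ih (fun d hd => hx d (by simp [hd])) hi

theorem pvQ : ∀ (t u : List (List Char)), pvGood t → pvGood u → u ≠ [] →
    (pvE u ++ [' ']) <:+: (pvE t ++ [' ']) → u <:+: t := by
  intro t
  induction t with
  | nil =>
    intro u _ hu hne h
    exfalso
    cases u with
    | nil => exact hne rfl
    | cons x u' =>
      have hx := (hu x (by simp)).1
      cases x with
      | nil => exact hx rfl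
      | cons a b => have hlen := h.length_le; simp [pvE] at hlen
  | cons y t' ih =>
    intro u ht hu hne h
    have h' : pvE u ++ [' '] <:+: ' ' :: (y ++ (pvE t' ++ [' '])) := by simpa [pvE] using h
    rcases List.infix_cons_iff.1 h' with hp | hi
    · have : pvE u ++ [' '] <+: pvE (y :: t') ++ [' '] := by simpa [pvE] using hp
      exact (pvP u (y :: t') hu ht hne this).isInfix
    · obtain ⟨r, hr⟩ := pvE_pad_cons u
      rw [hr] at hi
      have hi2 := pvSkip (ht y (by simp)).2 hi
      rw [← hr] at hi2
      cases t' with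
      | nil =>
        exfalso
        cases u with
        | nil => exact hne rfl
        | cons x u' =>
          have hx := (hu x (by simp)).1
          cases x with
          | nil => exact hx rfl
          | cons a b => have hlen := hi2.length_le; simp [pvE] at hlen
      | cons z t'' =>
        have := ih u (fun w hw => ht w (by simp [hw])) hu hne hi2
        exact this.trans (List.suffix_cons y _).isInfix

theorem pvRev {u t : List (List Char)} (h : u <:+: t) :
    (pvE u ++ [' ']) <:+: (pvE t ++ [' ']) := by
  obtain ⟨a, b, rfl⟩ := h
  cases b with
  | nil => exact ⟨pvE a, [], by simp [pvE]⟩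
  | cons w b' =>
    refine ⟨pvE a, w ++ pvE b' ++ [' '], ?_⟩
    simp [pvE]


theorem pvNgram_iff (words tw : List String) :
    pvNgram words tw = true ↔ tw <:+: words := by
  constructor
  · intro h
    obtain ⟨i, hmem, hp⟩ := List.any_eq_true.1 h
    obtain ⟨h0, hlt⟩ := PySem.List.mem_pyRange_one.1 hmem
    obtain ⟨n, rfl⟩ := Int.eq_ofNat_of_zero_le h0
    have : PySem.List.slice words (some (n : Int)) (some ((n : Int) + (tw.length : Int))) = tw := by
      simpa using hp
    rw [show ((n : Int) + (tw.length : Int)) = ((n + tw.length : Nat) : Int) by push_cast; ring,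
        PySem.List.slice_natCast] at this
    have htake : tw <+: words.drop n := by
      rw [List.prefix_iff_eq_take]
      rw [show n + tw.length - n = tw.length by omega] at this
      exact this.symm
    exact htake.isInfix.trans (List.drop_suffix n words).isInfix
  · rintro ⟨a, b, rfl⟩
    apply List.any_eq_true.2
    refine ⟨(a.length : Int), ?_, ?_⟩
    · apply PySem.List.mem_pyRange_one.2
      constructor
      · positivity
      · simp; omega
    · rw [show ((a.length : Int) + (tw.length : Int)) = ((a.length + tw.length : Nat) : Int) by push_cast; ring,
          PySem.List.slice_natCast]
      simp [show a.length + tw.length - a.length = tw.length by omega]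

theorem map_infix_iff {α β : Type} (f : α → β) (hf : Function.Injective f)
    (u t : List α) : u.map f <:+: t.map f ↔ u <:+: t := by
  constructor
  · rintro ⟨a, b, h⟩
    rw [eq_comm, List.map_eq_append_iff] at h
    obtain ⟨a', rest, rfl, ha, hrest⟩ := h
    rw [List.map_eq_append_iff] at ha
    obtain ⟨a2, u', rfl, ha2, hu'⟩ := ha
    have : u' = u := List.map_injective_iff.2 hf hu'
    exact ⟨a2, rest, by rw [this]⟩
  · exact fun h => h.map f

theorem split₀_go_goodW (s : List Char) : ∀ (cur : List Char) (acc : List (List Char)),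
    (∀ c ∈ cur, PySem.Chars.isspace c = false) →
    (∀ w ∈ acc, w ≠ [] ∧ ∀ c ∈ w, PySem.Chars.isspace c = false) →
    ∀ w ∈ PySem.Chars.split₀.go s cur acc, w ≠ [] ∧ ∀ c ∈ w, PySem.Chars.isspace c = false := by
  induction s with
  | nil =>
    intro cur acc hcur hacc w hw
    by_cases hc : cur.isEmpty
    · simp [PySem.Chars.split₀.go, hc] at hw
      exact hacc w hw
    · simp [PySem.Chars.split₀.go, hc] at hw
      rcases hw with h | h
      · exact hacc w h
      · subst h
        constructor
        · simp [List.isEmpty_iff] at hc; simpa using hc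
        · intro c hc2; exact hcur c (by simpa using hc2)
  | cons c rest ih =>
    intro cur acc hcur hacc
    by_cases hs : PySem.Chars.isspace c
    · by_cases hc : cur.isEmpty
      · simpa [PySem.Chars.split₀.go, hs, hc] using ih [] acc (by simp) hacc
      · have hacc2 : ∀ w ∈ cur.reverse :: acc, w ≠ [] ∧ ∀ c ∈ w, PySem.Chars.isspace c = false := by
          intro w hw
          rcases List.mem_cons.1 hw with h | h
          · subst h
            refine ⟨by simp [List.isEmpty_iff] at hc; simpa using hc,
                   fun d hd => hcur d (by simpa using hd)⟩
          · exact hacc w h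
        simpa [PySem.Chars.split₀.go, hs, hc] using ih [] (cur.reverse :: acc) (by simp) hacc2
    · have hcur2 : ∀ d ∈ c :: cur, PySem.Chars.isspace d = false := by
        intro d hd
        rcases List.mem_cons.1 hd with h | h
        · subst h; simpa using hs
        · exact hcur d h
      simpa [PySem.Chars.split₀.go, hs] using ih (c :: cur) acc hcur2 hacc

theorem pvTokens_good (v : String) : pvGood ((pvTokens v).map String.toList) := by
  rw [pvTokens, PySem.Str.split₀_map_toList]
  intro w hw
  have h := split₀_go_goodW _ [] [] (by simp) (by simp) w (by simpa [PySem.Chars.split₀] using hw)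
  refine ⟨h.1, fun c hc hceq => ?_⟩
  have h2 := h.2 c hc
  subst hceq
  simp [PySem.Chars.isspace] at h2


theorem pvJoin_toList (ts : List String) :
    (PySem.Str.join " " ts).toList = List.intercalate [' '] (ts.map String.toList) := by
  simp [PySem.Str.toList_join, PySem.Chars.join]

theorem pvPadded_toList (s : String) :
    (pvPadded s).toList = [' '] ++ s.toList ++ [' '] := by
  simp [pvPadded, PySem.Str.toList_join, PySem.Chars.join, List.intercalate]

theorem pvNormalize_eq (v : String) :
    normalize_country_name v = PySem.Str.join " " (pvTokens v) := rfl

theorem pvNormalize_empty_iff (v : String) :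
    normalize_country_name v = "" ↔ pvTokens v = [] := by
  rw [pvNormalize_eq]
  constructor
  · intro h
    have h2 := congrArg String.toList h
    rw [pvJoin_toList] at h2
    by_contra hne
    cases hh : pvTokens v with
    | nil => exact hne hh
    | cons w t =>
      have hg := pvTokens_good v
      rw [hh] at hg h2
      have hw : w.toList ≠ [] := (hg w.toList (by simp)).1
      cases t with
      | nil => simp [List.intercalate] at h2; exact hw (by simpa using h2)
      | cons x t' =>
        simp [List.intercalate] at h2
  · intro h
    rw [h]
    rfl

theorem pvMatch_eq (tt tw : List String) (htt : tt ≠ []) (htw : tw ≠ [])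
    (hgt : pvGood (tt.map String.toList)) (hgw : pvGood (tw.map String.toList)) :
    PySem.Str.isIn (pvPadded (PySem.Str.join " " tw)) (pvPadded (PySem.Str.join " " tt))
      = pvNgram tt tw := by
  have hmt : tt.map String.toList ≠ [] := by simpa using htt
  have hmw : tw.map String.toList ≠ [] := by simpa using htw
  have he : ∀ (ts : List String), ts.map String.toList ≠ [] →
      (pvPadded (PySem.Str.join " " ts)).toList = pvE (ts.map String.toList) ++ [' '] := by
    intro ts h
    rw [pvPadded_toList, pvJoin_toList, ← pvE_enc _ h]
    simp
  cases hn : pvNgram tt tw with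
  | true =>
    rw [(PySem.Str.isIn_iff_infix _ _).2 ?_]
    rw [he tw hmw, he tt hmt]
    exact pvRev ((map_infix_iff String.toList (fun _ _ => String.toList_inj.mp) tw tt).2 ((pvNgram_iff tt tw).1 hn))
  | false =>
    by_contra hc
    have := (PySem.Str.isIn_iff_infix _ _).1 (by simpa using hc)
    rw [he tw hmw, he tt hmt] at this
    have := pvQ _ _ hgt hgw hmw this
    have := (map_infix_iff String.toList (fun _ _ => String.toList_inj.mp) tw tt).1 this
    rw [(pvNgram_iff tt tw).2 this] at hn
    exact Bool.noConfusion hn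

theorem pvLoopAB (tt : List String) (htt : tt ≠ [])
    (hg : pvGood (tt.map String.toList)) :
    ∀ terms, pvLoopA (pvPadded (PySem.Str.join " " tt)) terms = pvLoopB tt terms := by
  intro terms
  induction terms with
  | nil => rfl
  | cons term rest ih =>
    show pvLoopA _ (term :: rest) = pvLoopB _ (term :: rest)
    rw [pvLoopA, pvLoopB]
    by_cases hz : pvTokens term = []
    · rw [if_pos ((pvNormalize_empty_iff term).2 hz), if_pos (by simp [hz]), ih]
    · have hb : ¬ (pvTokens term).length = 0 := by simpa using hz
      rw [if_neg (fun h => hz ((pvNormalize_empty_iff term).1 h)), if_neg hb]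
      rw [pvNormalize_eq, pvMatch_eq tt (pvTokens term) htt hz hg (pvTokens_good term)]
      cases pvNgram tt (pvTokens term) <;> simp [ih]

-- ===== VERDICT (by name: the statement is the Claim_ definition above) =====
theorem text_matches_country_terms_spec : Claim_equal_text_matches_country_terms := by
  intro text terms _
  show text_matches_country_terms text terms = text_matches_country_terms_alt text terms
  rw [text_matches_country_terms, text_matches_country_terms_alt]
  have hiff : (normalize_country_name text = "" ∨ terms = []) ↔ (pvTokens text = [] ∨ terms = []) :=
    or_congr (pvNormalize_empty_iff text) Iff.rfl
  by_cases hc : pvTokens text = [] ∨ terms = []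
  · rw [if_pos (hiff.2 hc), if_pos hc]
  · rw [if_neg (fun h => hc (hiff.1 h)), if_neg hc]
    have htt : pvTokens text ≠ [] := fun h => hc (Or.inl h)
    rw [pvNormalize_eq]
    exact pvLoopAB _ htt (pvTokens_good text) terms
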